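-- pv_equiv track=rewrite | github.com/EeyoungSong/codetree-TILs | 240102/DateTime to DateTime/datetime-to-datetime.py | calc_mins
-- ===== SOURCE A (Python) =====
-- def calc_mins(a, b, c):
--     date = 11
--     hours = 11
--     mins = 11
--     elapsed_time = 0
--
--     if a < 11 or (a == 11 and b < 11) or (a == 11 and b == 11 and c < 11):
--         return -1
--     else:
--         while True:
--             if date == a and hours == b and mins == c:
--                 break
--
--             elapsed_time += 1
--             mins += 1
--
--             if mins == 60:
--                 hours += 1
--                 mins = 0
--
--             if hours == 24:
--                 date += 1
--                 hours = 0
--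
--         return elapsed_time
-- ===== SOURCE B (Python) =====
-- def calc_mins(a, b, c):
--     if (a, b, c) < (11, 11, 11):
--         return -1
--     return (a - 11) * 1440 + (b - 11) * 60 + (c - 11)
-- ===== Notes on version B (the rewrite author's own statement) =====
-- stated objective: alternative
-- what changed: Replaces the minute-by-minute simulation loop with a closed-form mixed-radix formula (a-11)*1440+(b-11)*60+(c-11) behind the same before-start check; intended as faster (O(1) vs O(elapsed)) but a timing run could not confirm a ratio (A times out at larger sizes; 4.2x at the largest size both finished).
import Mathlib
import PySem

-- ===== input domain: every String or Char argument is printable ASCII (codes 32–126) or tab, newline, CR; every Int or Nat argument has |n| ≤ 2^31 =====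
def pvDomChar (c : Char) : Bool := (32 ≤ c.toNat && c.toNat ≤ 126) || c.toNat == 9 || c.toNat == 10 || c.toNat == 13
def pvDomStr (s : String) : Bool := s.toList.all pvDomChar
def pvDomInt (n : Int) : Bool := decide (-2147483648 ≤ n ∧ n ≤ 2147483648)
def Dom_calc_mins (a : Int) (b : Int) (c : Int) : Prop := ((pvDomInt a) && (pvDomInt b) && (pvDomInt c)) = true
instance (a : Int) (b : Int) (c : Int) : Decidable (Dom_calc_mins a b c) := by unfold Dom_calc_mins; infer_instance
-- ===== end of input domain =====

-- B replaces A's minute-by-minute counting loop with a closed-form mixed-radix formula (a different algorithm; intended as faster, not confirmed).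

-- ===== PORT A =====
-- the while-True loop, made total with fuel (the guard only makes the same computation total;
-- inside Pre_ the fuel is proved sufficient, so the 0-fuel branch is never taken)
def calcMinsLoop (a b c : Int) : Nat → Int → Int → Int → Int → Int
  | 0, _, _, _, elapsed => elapsed
  | f + 1, date, hours, mins, elapsed =>
    if date = a ∧ hours = b ∧ mins = c then elapsed
    else
      let elapsed := elapsed + 1
      let mins := mins + 1
      let (hours, mins) := if mins = 60 then (hours + 1, (0 : Int)) else (hours, mins)
      let (date, hours) := if hours = 24 then (date + 1, (0 : Int)) else (date, hours)
      calcMinsLoop a b c f date hours mins elapsed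

def calc_mins (a : Int) (b : Int) (c : Int) : Int :=
  if a < 11 ∨ (a = 11 ∧ b < 11) ∨ (a = 11 ∧ b = 11 ∧ c < 11) then -1
  else calcMinsLoop a b c (((a - 11) * 1440 + (b - 11) * 60 + (c - 11)).toNat + 1) 11 11 11 0

-- ===== PORT B =====
def calc_mins_alt (a : Int) (b : Int) (c : Int) : Int :=
  -- Python tuple comparison (a,b,c) < (11,11,11)
  if a < 11 ∨ (a = 11 ∧ (b < 11 ∨ (b = 11 ∧ c < 11))) then -1
  else (a - 11) * 1440 + (b - 11) * 60 + (c - 11)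

-- ===== PRECONDITION & SPEC =====
-- Pre_ excludes exactly the inputs on which A's loop never terminates (a target past the start
-- whose hours/minutes are outside 0..23 / 0..59, a state the simulated clock never reaches);
-- on every excluded input A diverges and returns nothing.
def Pre_calc_mins (a : Int) (b : Int) (c : Int) : Prop :=
  (a < 11 ∨ (a = 11 ∧ b < 11) ∨ (a = 11 ∧ b = 11 ∧ c < 11)) ∨
  (0 ≤ b ∧ b < 24 ∧ 0 ≤ c ∧ c < 60)
instance (a : Int) (b : Int) (c : Int) : Decidable (Pre_calc_mins a b c) := by
  unfold Pre_calc_mins; infer_instance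

def pvWitness_calc_mins : Int × Int × Int := (12, 0, 0)

def Spec_calc_mins (a : Int) (b : Int) (c : Int) (out : Int) : Prop := out = calc_mins_alt a b c
instance (a : Int) (b : Int) (c : Int) (out : Int) : Decidable (Spec_calc_mins a b c out) := by
  unfold Spec_calc_mins; infer_instance

-- ===== CLAIM (what is proved, stated in full; the proofs are below) =====
def Claim_equal_calc_mins : Prop := ∀ (a : Int) (b : Int) (c : Int), Dom_calc_mins a b c → Pre_calc_mins a b c → Spec_calc_mins a b c (calc_mins a b c)

-- ===== LEMMAS AND PROOFS =====

-- Loop invariant: from a canonical clock state at total d*1440+h*60+m, with enough fuel,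
-- the loop returns elapsed + (target - current total).
theorem calcMinsLoop_eq (a b c : Int) (hb : 0 ≤ b ∧ b < 24) (hc : 0 ≤ c ∧ c < 60) :
    ∀ (f : Nat) (d h m e : Int), 0 ≤ h → h < 24 → 0 ≤ m → m < 60 →
    d * 1440 + h * 60 + m ≤ a * 1440 + b * 60 + c →
    (a * 1440 + b * 60 + c - (d * 1440 + h * 60 + m)).toNat < f →
    calcMinsLoop a b c f d h m e = e + (a * 1440 + b * 60 + c - (d * 1440 + h * 60 + m)) := by
  intro f
  induction f with
  | zero => intro d h m e _ _ _ _ _ hf; omega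
  | succ f ih =>
    intro d h m e h0 h1 m0 m1 hle hf
    by_cases hstop : d = a ∧ h = b ∧ m = c
    · simp only [calcMinsLoop, if_pos hstop]
      omega
    · have hlt : d * 1440 + h * 60 + m < a * 1440 + b * 60 + c := by
        rcases lt_or_eq_of_le hle with h' | h'
        · exact h'
        · exfalso; apply hstop; constructor <;> omega
      simp only [calcMinsLoop, if_neg hstop]
      by_cases hm : m + 1 = 60
      · by_cases hh : h + 1 = 24
        · simp only [hm, hh]
          simp only [if_true]
          rw [ih (d + 1) 0 0 (e + 1) (by omega) (by omega) (by omega) (by omega) (by omega) (by omega)]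
          omega
        · simp only [hm]
          simp only [if_true, if_neg hh]
          rw [ih d (h + 1) 0 (e + 1) (by omega) (by omega) (by omega) (by omega) (by omega) (by omega)]
          omega
      · have hh : ¬ h = 24 := by omega
        simp only [if_neg hm]
        simp only [if_neg hh]
        rw [ih d h (m + 1) (e + 1) h0 h1 (by omega) (by omega) (by omega) (by omega)]
        omega

-- ===== VERDICT (by name: the statement is the Claim_ definition above) =====
theorem calc_mins_spec : Claim_equal_calc_mins := by
  intro a b c _ hpre
  unfold Spec_calc_mins calc_mins calc_mins_alt
  by_cases hg : a < 11 ∨ (a = 11 ∧ b < 11) ∨ (a = 11 ∧ b = 11 ∧ c < 11)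
  · have hg' : a < 11 ∨ (a = 11 ∧ (b < 11 ∨ (b = 11 ∧ c < 11))) := by tauto
    simp [hg, hg']
  · have hg' : ¬ (a < 11 ∨ (a = 11 ∧ (b < 11 ∨ (b = 11 ∧ c < 11)))) := by tauto
    simp only [if_neg hg, if_neg hg']
    rcases hpre with h | ⟨hb0, hb1, hc0, hc1⟩
    · exact absurd h hg
    · have hstart : (11 : Int) * 1440 + 11 * 60 + 11 ≤ a * 1440 + b * 60 + c := by
        push Not at hg; omega
      rw [calcMinsLoop_eq a b c ⟨hb0, hb1⟩ ⟨hc0, hc1⟩ _ 11 11 11 0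
          (by omega) (by omega) (by omega) (by omega) hstart (by omega)]
      omega
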